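-- pv_equiv track=rewrite | github.com/intro-prog-unisabana/examen2-59-tom-182008 | temp_monitor.py | longest_rising_streak
-- ===== SOURCE A (Python) =====
-- def longest_rising_streak(monitor):
--         if not monitor["readings"]:
--             return 0
--         max_streak = 1
--         current_streak = 1
--         for i in range(1, len(monitor["readings"])):
--             if monitor["readings"][i] > monitor["readings"][i - 1]:
--                 current_streak += 1
--             else:
--                 max_streak = max(max_streak, current_streak)
--                 current_streak = 1
--         max_streak = max(max_streak, current_streak)
--         return max_streak
--     # TODO: Implementar
--         pass
-- ===== SOURCE B (Python) =====
-- def longest_rising_streak(monitor):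
--     r = monitor["readings"]
--     n = len(r)
--     if n == 0:
--         return 0
--     breaks = [i for i in range(1, n) if r[i] <= r[i - 1]]
--     bounds = [0] + breaks + [n]
--     return max(bounds[j + 1] - bounds[j] for j in range(len(bounds) - 1))
-- ===== Notes on version B (the rewrite author's own statement) =====
-- stated objective: alternative
-- what changed: Replaces the running-counter/running-max scan with a boundary-collection pass (indices where the sequence fails to rise strictly) followed by a pass maximising the gaps between consecutive boundaries.
import Mathlib
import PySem

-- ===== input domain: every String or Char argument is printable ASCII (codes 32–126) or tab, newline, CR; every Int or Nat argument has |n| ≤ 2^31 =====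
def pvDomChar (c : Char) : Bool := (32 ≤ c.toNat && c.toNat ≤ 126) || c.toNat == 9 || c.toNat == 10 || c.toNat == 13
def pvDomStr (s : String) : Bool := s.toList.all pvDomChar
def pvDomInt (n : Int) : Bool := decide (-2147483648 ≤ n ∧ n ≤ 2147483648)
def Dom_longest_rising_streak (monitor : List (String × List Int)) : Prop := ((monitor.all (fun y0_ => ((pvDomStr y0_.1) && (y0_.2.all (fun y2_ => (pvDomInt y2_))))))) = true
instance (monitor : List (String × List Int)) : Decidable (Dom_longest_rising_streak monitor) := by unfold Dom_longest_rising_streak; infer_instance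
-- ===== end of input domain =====

-- B collects the break indices (where the sequence fails to rise strictly) and maximises
-- the gaps between consecutive boundaries, instead of A's running-counter/running-max scan.

-- ===== PORT A =====
def longest_rising_streak (monitor : List (String × List Int)) : Int :=
  -- monitor["readings"]: first-match association lookup; KeyError (none) is excluded by Pre_
  let readings := (List.lookup "readings" monitor).getD []
  if readings = [] then 0
  else
    let st := (PySem.List.pyRange 1 (readings.length : Int) 1).foldl
      (fun (st : Int × Int) i =>
        if PySem.List.pyGetD readings i 0 > PySem.List.pyGetD readings (i - 1) 0 then
          (st.1, st.2 + 1)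
        else
          (max st.1 st.2, 1))
      (1, 1)
    max st.1 st.2

-- ===== PORT B =====
def longest_rising_streak_alt (monitor : List (String × List Int)) : Int :=
  let r := (List.lookup "readings" monitor).getD []
  let n : Int := (r.length : Int)
  if n = 0 then 0
  else
    let breaks := (PySem.List.pyRange 1 n 1).filter
      (fun i => PySem.List.pyGetD r i 0 ≤ PySem.List.pyGetD r (i - 1) 0)
    let bounds := 0 :: (breaks ++ [n])
    let gaps := (PySem.List.pyRange 0 ((bounds.length : Int) - 1) 1).map
      (fun j => PySem.List.pyGetD bounds (j + 1) 0 - PySem.List.pyGetD bounds j 0)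
    (PySem.List.max? gaps (fun x => x)).getD 0

-- ===== PRECONDITION & SPEC =====
-- Pre_ excludes only inputs with no "readings" key, where A raises KeyError (and B raises too).
def Pre_longest_rising_streak (monitor : List (String × List Int)) : Prop :=
  "readings" ∈ monitor.map Prod.fst
instance (monitor : List (String × List Int)) : Decidable (Pre_longest_rising_streak monitor) := by unfold Pre_longest_rising_streak; infer_instance

def pvWitness_longest_rising_streak : (List (String × List Int)) := [("readings", [3, 1, 2])]

def Spec_longest_rising_streak (monitor : List (String × List Int)) (out : Int) : Prop := out = longest_rising_streak_alt monitor
instance (monitor : List (String × List Int)) (out : Int) : Decidable (Spec_longest_rising_streak monitor out) := by unfold Spec_longest_rising_streak; infer_instance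

-- ===== CLAIM (what is proved, stated in full; the proofs are below) =====
def Claim_equal_longest_rising_streak : Prop := ∀ (monitor : List (String × List Int)), Dom_longest_rising_streak monitor → Pre_longest_rising_streak monitor → Spec_longest_rising_streak monitor (longest_rising_streak monitor)

-- ===== LEMMAS AND PROOFS =====

-- successive differences of a list
def pvDiffs : List Int → List Int
  | a :: b :: t => (b - a) :: pvDiffs (b :: t)
  | _ => []

theorem pvDiffs_length : ∀ (l : List Int), (pvDiffs l).length = l.length - 1
  | [] => rfl
  | [_] => rfl
  | _ :: b :: t => by simp [pvDiffs, pvDiffs_length (b :: t)]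

theorem pvDiffs_getElem : ∀ (l : List Int) (k : Nat) (h : k + 1 < l.length)
    (h' : k < (pvDiffs l).length),
    (pvDiffs l)[k] = l[k + 1] - l[k]
  | a :: b :: t, 0, _, _ => rfl
  | a :: b :: t, (k+1), h, h' => by
      simpa [pvDiffs] using pvDiffs_getElem (b :: t) k (by simpa using h)
        (by simpa [pvDiffs] using h')

theorem pvDiffs_append : ∀ (l : List Int) (x : Int), l ≠ [] →
    pvDiffs (l ++ [x]) = pvDiffs l ++ [x - l.getLastD 0]
  | [], _, h => absurd rfl h
  | [a], x, _ => rfl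
  | a :: b :: t, x, _ => by
      have ih := pvDiffs_append (b :: t) x (by simp)
      simp only [List.cons_append] at ih ⊢
      simp [pvDiffs, ih]

-- B's gap-computation pass equals the successive differences of the bounds list
theorem pv_gaps_eq (bounds : List Int) :
    (PySem.List.pyRange 0 ((bounds.length : Int) - 1) 1).map
      (fun j => PySem.List.pyGetD bounds (j + 1) 0 - PySem.List.pyGetD bounds j 0)
    = pvDiffs bounds := by
  apply List.ext_getElem
  · simp only [List.length_map, PySem.List.length_pyRange_one, pvDiffs_length]
    omega
  · intro k h1 h2
    have hk : k + 1 < bounds.length := by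
      simp [PySem.List.length_pyRange_one] at h1; omega
    rw [List.getElem_map, PySem.List.getElem_pyRange_one]
    rw [pvDiffs_getElem bounds k hk h2]
    rw [PySem.List.pyGetD_eq_getElem bounds 0 (by omega) (by omega),
        PySem.List.pyGetD_eq_getElem bounds 0 (by omega) (by omega)]
    congr 1 <;> congr 1 <;> omega

-- seed exchange for running max
theorem pv_foldl_max_seed : ∀ (l : List Int) (a b : Int),
    l.foldl max (max a b) = max a (l.foldl max b)
  | [], a, b => rfl
  | x :: t, a, b => by
      simp only [List.foldl_cons]
      rw [max_assoc, pv_foldl_max_seed t a (max b x)]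

-- the loop invariant: A's scan state after processing indices 1..k-1
theorem pv_invariant (r : List Int) (k : Nat) (hk : 1 ≤ k) :
    (PySem.List.pyRange 1 (k : Int) 1).foldl
      (fun (st : Int × Int) i =>
        if PySem.List.pyGetD r i 0 > PySem.List.pyGetD r (i - 1) 0 then
          (st.1, st.2 + 1)
        else
          (max st.1 st.2, 1))
      (1, 1)
    = ((pvDiffs (0 :: (PySem.List.pyRange 1 (k : Int) 1).filter
           (fun i => PySem.List.pyGetD r i 0 ≤ PySem.List.pyGetD r (i - 1) 0))).foldl max 1,
       (k : Int) - ((PySem.List.pyRange 1 (k : Int) 1).filter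
           (fun i => PySem.List.pyGetD r i 0 ≤ PySem.List.pyGetD r (i - 1) 0)).getLastD 0) := by
  induction k, hk using Nat.le_induction with
  | base =>
      simp [PySem.List.pyRange_one_eq_nil (by omega : (1:Int) ≤ 1), pvDiffs]
  | succ k hk ih =>
      have hsplit : PySem.List.pyRange 1 ((k:Int) + 1) 1
          = PySem.List.pyRange 1 (k : Int) 1 ++ [(k : Int)] :=
        PySem.List.pyRange_one_succ_right (by exact_mod_cast hk)
      push_cast
      rw [hsplit, List.foldl_append, List.filter_append, ih]
      simp only [List.foldl_cons, List.foldl_nil]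
      by_cases h : PySem.List.pyGetD r (k : Int) 0 ≤ PySem.List.pyGetD r ((k : Int) - 1) 0
      · -- break at k: streak resets to 1, k joins the boundary list
        rw [if_neg (not_lt.mpr h)]
        have hfil : List.filter
            (fun i => decide (PySem.List.pyGetD r i 0 ≤ PySem.List.pyGetD r (i - 1) 0))
            [(k : Int)] = [(k : Int)] := by
          simp only [List.filter_cons, List.filter_nil, decide_eq_true h, if_true]
        rw [hfil]
        refine Prod.ext ?_ ?_
        · rw [← List.cons_append, pvDiffs_append _ _ (by simp), List.foldl_append]
          have hl : ((0 : Int) :: (PySem.List.pyRange 1 (k : Int) 1).filter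
              (fun i => decide (PySem.List.pyGetD r i 0 ≤ PySem.List.pyGetD r (i - 1) 0))).getLastD 0
              = ((PySem.List.pyRange 1 (k : Int) 1).filter
              (fun i => decide (PySem.List.pyGetD r i 0 ≤ PySem.List.pyGetD r (i - 1) 0))).getLastD 0 := by
            cases (PySem.List.pyRange 1 (k : Int) 1).filter
              (fun i => decide (PySem.List.pyGetD r i 0 ≤ PySem.List.pyGetD r (i - 1) 0)) <;> simp
          rw [hl]
          simp
        · show (1 : Int) = _
          rw [List.getLastD_concat]
          omega
      · -- still rising at k: streak extends, boundary list unchanged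
        rw [if_pos (not_le.mp h)]
        have hfil : List.filter
            (fun i => decide (PySem.List.pyGetD r i 0 ≤ PySem.List.pyGetD r (i - 1) 0))
            [(k : Int)] = [] := by
          rw [List.filter_cons, List.filter_nil, decide_eq_false h]
          rfl
        rw [hfil, List.append_nil]
        exact Prod.ext rfl (by show _ + 1 = _; omega)

-- the last break index is below n
theorem pv_getLastD_le (l : List Int) (n : Int) (hn : 1 ≤ n)
    (hall : ∀ x ∈ l, x < n) : l.getLastD 0 ≤ n - 1 := by
  cases l with
  | nil => simp; omega
  | cons x t =>
      have hmem : (x :: t).getLastD 0 ∈ x :: t := by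
        rw [List.getLastD_eq_getLast?, List.getLast?_eq_some_getLast (by simp)]
        simp [List.getLast_mem (l := x :: t)]
      have := hall _ hmem
      omega

-- ===== VERDICT (by name: the statement is the Claim_ definition above) =====
theorem longest_rising_streak_spec : Claim_equal_longest_rising_streak := by
  intro monitor _hdom _hpre
  unfold Spec_longest_rising_streak longest_rising_streak longest_rising_streak_alt
  set r := (List.lookup "readings" monitor).getD [] with hr
  by_cases hemp : r = []
  · simp [hemp]
  · have hlen : 1 ≤ r.length := by
      have := List.length_pos_of_ne_nil hemp
      omega
    have hn0 : ((r.length : Int)) ≠ 0 := by exact_mod_cast Nat.one_le_iff_ne_zero.mp hlen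
    simp only [hemp, hn0, if_false]
    rw [pv_invariant r r.length hlen]
    set bs := (PySem.List.pyRange 1 (r.length : Int) 1).filter
      (fun i => PySem.List.pyGetD r i 0 ≤ PySem.List.pyGetD r (i - 1) 0) with hbs
    rw [pv_gaps_eq]
    have hx : (1:Int) ≤ (r.length : Int) - bs.getLastD 0 := by
      have hall : ∀ x ∈ bs, x < (r.length : Int) := by
        intro x hxmem
        rw [hbs] at hxmem
        have := (PySem.List.mem_pyRange_one).mp (List.mem_of_mem_filter hxmem)
        omega
      have := pv_getLastD_le bs (r.length : Int) (by exact_mod_cast hlen) hall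
      omega
    rw [show ((0 : Int) :: (bs ++ [(r.length : Int)])) = (((0 : Int) :: bs) ++ [(r.length : Int)]) from rfl,
        pvDiffs_append _ _ (by simp)]
    have hlast : ((0 : Int) :: bs).getLastD 0 = bs.getLastD 0 := by
      cases bs <;> simp
    rw [hlast]
    cases hd : pvDiffs ((0 : Int) :: bs) with
    | nil =>
        rw [List.nil_append, PySem.List.max?_id_cons]
        simp only [Option.getD_some, List.foldl_nil]
        omega
    | cons h t =>
        rw [List.cons_append, PySem.List.max?_id_cons]
        simp only [Option.getD_some, List.foldl_append, List.foldl_cons, List.foldl_nil]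
        rw [pv_foldl_max_seed t 1 h]
        have h2 : (1:Int) ≤ max (List.foldl max h t) ((r.length : Int) - bs.getLastD 0) :=
          le_trans hx (le_max_right _ _)
        omega
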